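-- pv_equiv track=rewrite | github.com/Ab2021/infra | snowflake_agent.py | extract_unique_joins
-- ===== SOURCE A (Python) =====
-- from typing import Dict, List, Optional, Any
--
-- def extract_unique_joins(columns: List[Dict]) -> List[Dict]:
--     """Extract unique join key information from columns"""
--     join_pairs = set()
--     for col in columns:
--         join_key = col.get('JOIN_KEY', None)
--         table_name = col.get('table_name', None)
--         if join_key and table_name:
--             join_pairs.add((table_name, join_key))
--
--     return [{"table_name": t, "join_key": k} for (t, k) in sorted(join_pairs)]
-- ===== SOURCE B (Python) =====
-- def extract_unique_joins(columns):
--     """Extract unique join key information from columns (sort-then-unique)."""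
--     pairs = []
--     for col in columns:
--         join_key = col.get('JOIN_KEY', None)
--         table_name = col.get('table_name', None)
--         if join_key and table_name:
--             pairs.append((table_name, join_key))
--     pairs.sort()
--     result = []
--     prev = None
--     for p in pairs:
--         if p != prev:
--             result.append({"table_name": p[0], "join_key": p[1]})
--             prev = p
--     return result
-- ===== Notes on version B (the rewrite author's own statement) =====
-- stated objective: alternative
-- what changed: Replaces hash-set dedup followed by sorting with collecting all matching pairs (duplicates kept), sorting the full list, and one adjacent-comparison pass that emits a pair only when it differs from the previously emitted one.
import Mathlib
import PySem

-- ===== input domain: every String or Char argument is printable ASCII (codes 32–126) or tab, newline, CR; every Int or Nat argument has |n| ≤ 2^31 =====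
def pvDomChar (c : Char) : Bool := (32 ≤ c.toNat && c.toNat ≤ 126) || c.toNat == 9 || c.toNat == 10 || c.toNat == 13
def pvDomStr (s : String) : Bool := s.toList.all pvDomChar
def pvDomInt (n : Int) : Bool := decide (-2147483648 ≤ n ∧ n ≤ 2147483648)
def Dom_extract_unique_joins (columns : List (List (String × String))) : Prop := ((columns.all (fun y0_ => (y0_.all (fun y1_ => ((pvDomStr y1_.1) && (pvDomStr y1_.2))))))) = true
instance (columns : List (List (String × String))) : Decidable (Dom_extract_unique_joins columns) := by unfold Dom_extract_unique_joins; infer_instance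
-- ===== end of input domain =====

-- B collects all matching (table_name, join_key) pairs with duplicates, sorts the full list, and
-- deduplicates in one adjacent-comparison pass, instead of A's hash-set dedup before sorting.

-- ===== PORT A =====
def extract_unique_joins (columns : List (List (String × String))) : List (List (String × String)) :=
  let join_pairs : PySem.Set (String × String) :=
    columns.foldl (fun s col =>
      match (PySem.Dict.mk col).get? "JOIN_KEY", (PySem.Dict.mk col).get? "table_name" with
      | some j, some t => if j ≠ "" ∧ t ≠ "" then s.add (t, j) else s   -- 'if join_key and table_name'
      | _, _ => s) PySem.Set.empty
  (PySem.List.sorted2 join_pairs Prod.fst Prod.snd).map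
    (fun p => [("table_name", p.1), ("join_key", p.2)])

-- ===== PORT B =====
def extract_unique_joins_alt (columns : List (List (String × String))) : List (List (String × String)) :=
  let pairs : List (String × String) :=
    columns.foldl (fun acc col =>
      match (PySem.Dict.mk col).get? "JOIN_KEY" with
      | none => acc
      | some j =>
        match (PySem.Dict.mk col).get? "table_name" with
        | none => acc
        | some t => if j ≠ "" ∧ t ≠ "" then acc ++ [(t, j)] else acc) []
  let sortedPairs := PySem.List.sorted2 pairs Prod.fst Prod.snd   -- pairs.sort(): tuple comparison
  (sortedPairs.foldl
    (fun (st : List (List (String × String)) × Option (String × String)) p =>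
      if some p ≠ st.2 then (st.1 ++ [[("table_name", p.1), ("join_key", p.2)]], some p) else st)
    ([], none)).1

-- ===== PRECONDITION & SPEC =====
def Spec_extract_unique_joins (columns : List (List (String × String))) (out : List (List (String × String))) : Prop := out = extract_unique_joins_alt columns
instance (columns : List (List (String × String))) (out : List (List (String × String))) : Decidable (Spec_extract_unique_joins columns out) := by unfold Spec_extract_unique_joins; infer_instance

-- ===== CLAIM (what is proved, stated in full; the proofs are below) =====
def Claim_equal_extract_unique_joins : Prop := ∀ (columns : List (List (String × String))), Dom_extract_unique_joins columns → Spec_extract_unique_joins columns (extract_unique_joins columns)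

-- ===== LEMMAS AND PROOFS =====

-- sorted2 with fst/snd keys is sorted with the lexicographic key (same insertBy fold, pointwise-equal comparison)
theorem sorted2_eq_sorted_toLex (xs : List (String × String)) :
    PySem.List.sorted2 xs Prod.fst Prod.snd = PySem.List.sorted xs (fun x => toLex x) := by
  unfold PySem.List.sorted2 PySem.List.sorted
  have h : (fun (a b : String × String) => decide (a.1 < b.1) || (!decide (b.1 < a.1) && decide (a.2 < b.2)))
       = (fun (a b : String × String) => decide (toLex a < toLex b)) := by
    funext a b
    have hlex : (toLex a < toLex b) ↔ (a.1 < b.1 ∨ a.1 = b.1 ∧ a.2 < b.2) := Prod.Lex.lt_iff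
    by_cases h1 : a.1 < b.1
    · simp [h1, hlex, not_lt.mpr h1.le]
    · by_cases h2 : b.1 < a.1
      · simp [h1, h2, hlex, ne_of_gt h2]
      · have he : a.1 = b.1 := le_antisymm (not_lt.mp h2) (not_lt.mp h1)
        by_cases h3 : a.2 < b.2 <;> simp [h3, hlex, he]
  dsimp only
  rw [h]
  simp only [if_neg (Bool.false_ne_true)]

-- A's conditional Set.add fold equals ofList of B's conditional append fold (same filter, same pairs)
theorem fold_agree :
    ∀ (cols : List (List (String × String))) (s : PySem.Set (String × String)) (l : List (String × String)),
      s = PySem.Set.ofList l →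
      cols.foldl (fun s col =>
        match (PySem.Dict.mk col).get? "JOIN_KEY", (PySem.Dict.mk col).get? "table_name" with
        | some j, some t => if j ≠ "" ∧ t ≠ "" then s.add (t, j) else s
        | _, _ => s) s
      = PySem.Set.ofList (cols.foldl (fun acc col =>
        match (PySem.Dict.mk col).get? "JOIN_KEY" with
        | none => acc
        | some j =>
          match (PySem.Dict.mk col).get? "table_name" with
          | none => acc
          | some t => if j ≠ "" ∧ t ≠ "" then acc ++ [(t, j)] else acc) l) := by
  intro cols
  induction cols with
  | nil => intro s l h; simpa using h
  | cons c cs ih =>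
    intro s l h
    simp only [List.foldl_cons]
    cases hj : (PySem.Dict.mk c).get? "JOIN_KEY" with
    | none => exact ih s l h
    | some j =>
      cases ht : (PySem.Dict.mk c).get? "table_name" with
      | none => exact ih s l h
      | some t =>
        dsimp only
        by_cases hc : j ≠ "" ∧ t ≠ ""
        · rw [if_pos hc, if_pos hc]
          refine ih (s.add (t, j)) (l ++ [(t, j)]) ?_
          subst h
          simp [PySem.Set.ofList, List.foldl_append]
        · rw [if_neg hc, if_neg hc]; exact ih s l h

-- B's final pass as a recursion: drop an element equal to the previously emitted one
def ddAdj (prev : Option (String × String)) : List (String × String) → List (String × String)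
  | [] => []
  | x :: xs => if some x = prev then ddAdj prev xs else x :: ddAdj (some x) xs

theorem foldl_emit_eq_ddAdj (render : (String × String) → List (String × String)) :
    ∀ (zs : List (String × String)) (acc : List (List (String × String))) (prev : Option (String × String)),
      (zs.foldl (fun st p => if some p ≠ st.2 then (st.1 ++ [render p], some p) else st) (acc, prev)).1
      = acc ++ (ddAdj prev zs).map render := by
  intro zs
  induction zs with
  | nil => intro acc prev; simp [ddAdj]
  | cons x xs ih =>
    intro acc prev
    rw [List.foldl_cons]
    by_cases h : some x = prev
    · rw [if_neg (by simpa using h), ih]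
      simp only [ddAdj, if_pos h]
    · rw [if_pos (by simpa using h), ih]
      simp [ddAdj, if_neg h]

theorem mem_ddAdj (zs : List (String × String)) :
    ∀ (prev : Option (String × String)) (x : String × String),
      zs.Pairwise (fun a b => toLex a ≤ toLex b) →
      (∀ q, prev = some q → ∀ y ∈ zs, toLex q ≤ toLex y) →
      (x ∈ ddAdj prev zs ↔ x ∈ zs ∧ prev ≠ some x) := by
  induction zs with
  | nil => intro prev x _ _; simp [ddAdj]
  | cons y ys ih =>
    intro prev x hp hq
    have hp' : ys.Pairwise (fun a b => toLex a ≤ toLex b) := hp.tail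
    have hyle : ∀ z ∈ ys, toLex y ≤ toLex z := fun z hz => (List.pairwise_cons.mp hp).1 z hz
    by_cases h : some y = prev
    · simp only [ddAdj, if_pos h]
      rw [ih prev x hp' (fun q hq' z hz => hq q hq' z (List.mem_cons_of_mem _ hz))]
      constructor
      · rintro ⟨hx, hne⟩; exact ⟨List.mem_cons_of_mem _ hx, hne⟩
      · rintro ⟨hx, hne⟩
        rcases List.mem_cons.mp hx with rfl | hx'
        · exact absurd h.symm hne
        · exact ⟨hx', hne⟩
    · simp only [ddAdj, if_neg h, List.mem_cons]
      rw [ih (some y) x hp' (by rintro q ⟨rfl⟩; exact hyle)]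
      constructor
      · rintro (rfl | ⟨hx, hne⟩)
        · exact ⟨Or.inl rfl, fun he => h he.symm⟩
        · refine ⟨Or.inr hx, fun hpx => ?_⟩
          have hqy : toLex x ≤ toLex y := hq x hpx y (List.mem_cons_self)
          have hyx : toLex y ≤ toLex x := hyle x hx
          have hyx' : y = x := congrArg ofLex (le_antisymm hyx hqy)
          exact h (by rw [hyx', hpx])
      · rintro ⟨rfl | hx, hne⟩
        · exact Or.inl rfl
        · by_cases hxy : x = y
          · exact Or.inl hxy
          · exact Or.inr ⟨hx, by simpa using Ne.symm hxy⟩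

theorem pairwise_ddAdj (zs : List (String × String)) :
    ∀ (prev : Option (String × String)),
      zs.Pairwise (fun a b => toLex a ≤ toLex b) →
      (∀ q, prev = some q → ∀ y ∈ zs, toLex q ≤ toLex y) →
      (ddAdj prev zs).Pairwise (fun a b => toLex a < toLex b) := by
  induction zs with
  | nil => intro prev _ _; simp [ddAdj]
  | cons y ys ih =>
    intro prev hp hq
    have hp' : ys.Pairwise (fun a b => toLex a ≤ toLex b) := hp.tail
    have hyle : ∀ z ∈ ys, toLex y ≤ toLex z := fun z hz => (List.pairwise_cons.mp hp).1 z hz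
    by_cases h : some y = prev
    · simp only [ddAdj, if_pos h]
      exact ih prev hp' (fun q hq' z hz => hq q hq' z (List.mem_cons_of_mem _ hz))
    · simp only [ddAdj, if_neg h]
      refine List.pairwise_cons.mpr ⟨?_, ih (some y) hp' (by rintro q ⟨rfl⟩; exact hyle)⟩
      intro z hz
      have hz' := (mem_ddAdj ys (some y) z hp' (by rintro q ⟨rfl⟩; exact hyle)).mp hz
      have hne : y ≠ z := fun he => hz'.2 (by rw [he])
      exact lt_of_le_of_ne (hyle z hz'.1) (fun he => hne (congrArg ofLex he))

-- the heart: sorted over the dedup set = adjacent-dedup over sorted full list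
theorem sorted_ofList_eq_ddAdj (pairs : List (String × String)) :
    PySem.List.sorted (PySem.Set.ofList pairs) (fun x => toLex x)
    = ddAdj none (PySem.List.sorted pairs (fun x => toLex x)) := by
  have hz : (PySem.List.sorted pairs (fun x => toLex x)).Pairwise (fun a b => toLex a ≤ toLex b) :=
    PySem.List.sorted_pairwise pairs (fun x => toLex x)
  have hnone : ∀ q, (none : Option (String × String)) = some q →
      ∀ y ∈ PySem.List.sorted pairs (fun x => toLex x), toLex q ≤ toLex y := by
    rintro q ⟨⟩
  have hpw := pairwise_ddAdj _ none hz hnone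
  apply PySem.List.sorted_eq_of_perm_of_pairwise_lt
  · rw [List.perm_ext_iff_of_nodup
      (hpw.imp fun {a b} hl he => absurd (he ▸ hl) (lt_irrefl _))
      (PySem.Set.nodup_ofList pairs)]
    intro a
    rw [mem_ddAdj _ none a hz hnone]
    simp [PySem.List.mem_sorted, PySem.Set.mem_ofList]
  · exact hpw

-- ===== VERDICT (by name: the statement is the Claim_ definition above) =====
theorem extract_unique_joins_spec : Claim_equal_extract_unique_joins := by
  intro columns _
  unfold Spec_extract_unique_joins extract_unique_joins extract_unique_joins_alt
  dsimp only
  rw [fold_agree columns PySem.Set.empty [] rfl]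
  rw [foldl_emit_eq_ddAdj (fun p => [("table_name", p.1), ("join_key", p.2)])]
  rw [sorted2_eq_sorted_toLex, sorted2_eq_sorted_toLex]
  rw [sorted_ofList_eq_ddAdj]
  simp
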